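-- pv_equiv track=rewrite | github.com/PandABlocks/PandABlocks-FPGA | i2c/parse_ipmi.py | decode_6bit_ascii
-- ===== SOURCE A (Python) =====
-- def flatten_ll(ll):
--     return ''.join([i for j in ll for i in j])
--
-- def choplist(list, size):
--     return [list[i:i+size] for i in range(0, len(list), size)]
--
-- def decode_6bit_ascii(s):
--     def convert(x):
--         return chr(x + ord(' '))
--     return flatten_ll([
--         convert(x[0] & 0x3f),
--         convert(((x[1] & 0xf) << 2) | (x[0] >> 6)),
--         convert(((x[2] & 0x3) << 4) | (x[1] >> 4)),
--         convert(x[2] >> 2)] for x in choplist(s, 3))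
-- ===== SOURCE B (Python) =====
-- def decode_6bit_ascii(s):
--     if len(s) % 3:
--         raise IndexError('packed 6-bit ASCII needs whole 3-byte groups')
--     total = int.from_bytes(bytes(s), 'little')
--     return ''.join(chr(((total >> (6 * k)) & 0x3f) + 32) for k in range(len(s) * 8 // 6))
-- ===== Notes on version B (the rewrite author's own statement) =====
-- stated objective: idiomatic
-- what changed: A chops the list into 3-byte sublists (choplist + flatten helpers) and splices each 6-bit field by hand across byte boundaries with four different mask/shift/or expressions per chunk; B never chunks at all: it packs the ENTIRE input into one arbitrary-precision little-endian integer with int.from_bytes(bytes(s), 'little') and then reads the whole 6-bit digit stream off that one bignum with a single uniform shift-and-mask pass, so there are no per-group cases and no intermediate sublists.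
-- outside the precondition, e.g. on decode_6bit_ascii([4096, 0, 0]): A returns ' `  ', B raises ValueError
import Mathlib
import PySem

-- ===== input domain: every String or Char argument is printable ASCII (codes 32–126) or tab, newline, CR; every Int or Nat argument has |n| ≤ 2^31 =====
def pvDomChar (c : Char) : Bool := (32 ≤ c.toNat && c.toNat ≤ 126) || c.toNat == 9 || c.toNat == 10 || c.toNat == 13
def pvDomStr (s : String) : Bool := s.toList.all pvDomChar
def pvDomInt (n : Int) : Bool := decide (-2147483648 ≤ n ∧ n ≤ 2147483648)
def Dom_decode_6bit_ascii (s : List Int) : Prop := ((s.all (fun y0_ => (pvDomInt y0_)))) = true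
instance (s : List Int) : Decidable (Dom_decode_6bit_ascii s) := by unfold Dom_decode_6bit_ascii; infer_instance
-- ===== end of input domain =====

-- B drops A's 3-byte chunking (choplist/flatten, four hand-spliced cross-byte expressions) entirely:
-- it packs the whole input into ONE little-endian big integer via int.from_bytes(bytes(s), 'little'),
-- then reads the 6-bit digit stream off that single number with one uniform shift-and-mask pass.

-- ===== PORT A =====
-- chr(x + ord(' ')) — one-character strings are modelled as Char, ''.join as List.flatten
def pvConvert (x : Int) : Char := Char.ofNat (x + 32).toNat

-- choplist(list, size) = [list[i:i+size] for i in range(0, len(list), size)]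
def pvChoplist (l : List Int) (size : Int) : List (List Int) :=
  (PySem.List.pyRange 0 (PySem.List.len l) size).map
    (fun i => PySem.List.slice l (some i) (some (i + size)))

-- the four-character group of the generator expression; indexing the second and third element of a
-- short final chunk raises IndexError — Pre_ excludes those inputs, so pyGetD's default is never read
def pvGroupA (x : List Int) : List Char :=
  [pvConvert (PySem.Int.band (PySem.List.pyGetD x 0 0) 0x3f),
   pvConvert (PySem.Int.bor ((PySem.Int.band (PySem.List.pyGetD x 1 0) 0xf) <<< 2) ((PySem.List.pyGetD x 0 0) >>> 6)),
   pvConvert (PySem.Int.bor ((PySem.Int.band (PySem.List.pyGetD x 2 0) 0x3) <<< 4) ((PySem.List.pyGetD x 1 0) >>> 4)),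
   pvConvert ((PySem.List.pyGetD x 2 0) >>> 2)]

def decode_6bit_ascii (s : List Int) : String :=
  String.ofList (((pvChoplist s 3).map pvGroupA).flatten)

-- ===== PORT B =====
-- int.from_bytes(bytes(s), 'little') = Σ s[i]·256^i, exact where every element is a byte 0..255
-- (bytes(s) raises ValueError outside that range — those inputs are excluded by Pre_)
def pvFromBytesLE : List Int → Int
  | [] => 0
  | b :: t => b + 256 * pvFromBytesLE t

-- Source B: raise IndexError unless len(s) % 3 == 0 (those inputs are outside Pre_, so the raise
-- branch has no value to port); total = int.from_bytes(bytes(s), 'little');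
-- then ''.join(chr(((total >> (6 * k)) & 0x3f) + 32) for k in range(len(s) * 8 // 6)).
-- the range values k are ≥ 0, so '.toNat' on the shift amount is exact.
def decode_6bit_ascii_alt (s : List Int) : String :=
  let total := pvFromBytesLE s
  String.ofList ((PySem.List.pyRange 0 (PySem.Int.floordiv (PySem.List.len s * 8) 6) 1).map
    (fun k => Char.ofNat (PySem.Int.band (total >>> (6 * k).toNat) 63 + 32).toNat))

-- ===== PRECONDITION & SPEC =====
-- Pre_ is the packed-6-bit-ASCII domain the function is for: length a multiple of 3 (otherwise A's
-- chunk indexing raises IndexError on the short final chunk) and byte values 0..255 (a negative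
-- element makes A's chr raise ValueError; values ≥ 256 bleed across A's hand-spliced field
-- boundaries and yield accidental characters or a chr ValueError — an artefact of the splicing,
-- excluded, see the cites).
def Pre_decode_6bit_ascii (s : List Int) : Prop :=
  s.length % 3 = 0 ∧ ∀ x ∈ s, 0 ≤ x ∧ x < 256
instance (s : List Int) : Decidable (Pre_decode_6bit_ascii s) := by
  unfold Pre_decode_6bit_ascii; infer_instance

def pvWitness_decode_6bit_ascii : List Int := [7, 200, 31, 0, 255, 63]

def Spec_decode_6bit_ascii (s : List Int) (out : String) : Prop := out = decode_6bit_ascii_alt s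
instance (s : List Int) (out : String) : Decidable (Spec_decode_6bit_ascii s out) := by
  unfold Spec_decode_6bit_ascii; infer_instance

-- ===== CLAIM (what is proved, stated in full; the proofs are below) =====
def Claim_equal_decode_6bit_ascii : Prop := ∀ (s : List Int), Dom_decode_6bit_ascii s → Pre_decode_6bit_ascii s → Spec_decode_6bit_ascii s (decode_6bit_ascii s)

-- ===== LEMMAS AND PROOFS =====

-- A's four-character group, written on the three bytes of a chunk
def pvChA (a b c : Int) : List Char :=
  [pvConvert (PySem.Int.band a 63),
   pvConvert (PySem.Int.bor ((PySem.Int.band b 15) <<< 2) (a >>> 6)),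
   pvConvert (PySem.Int.bor ((PySem.Int.band c 3) <<< 4) (b >>> 4)),
   pvConvert (c >>> 2)]

-- B's k-th 6-bit digit of the Nat N, as a character
def pvDigN (N k : Nat) : Char := Char.ofNat ((N >>> (6 * k) &&& 63) + 32)

-- little-endian Nat value of the byte list (elements are nonneg under Pre_)
def pvTot : List Int → Nat
  | [] => 0
  | a :: t => a.toNat + 256 * pvTot t

-- per-chunk reference outputs (wildcard cases unreachable under Pre_'s length % 3 = 0)
def pvChB (a b c : Int) : List Char :=
  [pvDigN (a.toNat + 256 * b.toNat + 65536 * c.toNat) 0,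
   pvDigN (a.toNat + 256 * b.toNat + 65536 * c.toNat) 1,
   pvDigN (a.toNat + 256 * b.toNat + 65536 * c.toNat) 2,
   pvDigN (a.toNat + 256 * b.toNat + 65536 * c.toNat) 3]

def pvSpecA : List Int → List Char
  | a :: b :: c :: t => pvChA a b c ++ pvSpecA t
  | [] => []
  | [_] => []
  | [_, _] => []

def pvSpecB : List Int → List Char
  | a :: b :: c :: t => pvChB a b c ++ pvSpecB t
  | [] => []
  | [_] => []
  | [_, _] => []

lemma pvRange3 (n : Nat) :
    PySem.List.pyRange 0 (n : Int) 3 = (List.range ((n + 2) / 3)).map (fun k => ((3 * k : Nat) : Int)) := by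
  rw [PySem.List.pyRange_of_pos 0 (n : Int) (by norm_num)]
  by_cases h : 0 < n
  · rw [if_pos (by exact_mod_cast h)]
    have h2 : (((n : Int) - 0 + 3 - 1) / 3).toNat = (n + 2) / 3 := by omega
    rw [h2]
    apply List.map_congr_left
    intro k _
    push_cast; ring
  · rw [if_neg (by omega)]
    have : n = 0 := by omega
    subst this
    simp

lemma pvChoplist_nil : pvChoplist [] 3 = [] := by
  unfold pvChoplist
  rw [show PySem.List.len ([] : List Int) = (0:Int) from by simp [PySem.List.len_eq],
      show PySem.List.pyRange 0 0 3 = [] from by decide]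
  simp

lemma pvChoplist_cons (a b c : Int) (t : List Int) :
    pvChoplist (a :: b :: c :: t) 3 = [a, b, c] :: pvChoplist t 3 := by
  unfold pvChoplist
  simp only [PySem.List.len_eq, List.length_cons]
  have hl : ((t.length + 1 + 1 + 1 : Nat) : Int) = ((t.length + 3 : Nat) : Int) := by push_cast; ring
  rw [hl, pvRange3 (t.length + 3), pvRange3 t.length]
  have hc : (t.length + 3 + 2) / 3 = (t.length + 2) / 3 + 1 := by omega
  rw [hc, List.range_succ_eq_map]
  simp only [List.map_cons, List.map_map]
  refine List.cons_eq_cons.mpr ⟨?_, ?_⟩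
  · norm_num
    rw [show (3:Int) = ((3:Nat):Int) from rfl, PySem.List.slice_to_natCast]
    rfl
  · apply List.map_congr_left
    intro k _
    simp only [Function.comp_apply]
    rw [show (((3 * Nat.succ k : Nat) : Int) + 3) = ((3 * Nat.succ k : Nat) : Int) + ((3:Nat):Int) from by norm_num,
        PySem.List.slice_natCast_add,
        show (((3 * k : Nat) : Int) + 3) = ((3 * k : Nat) : Int) + ((3:Nat):Int) from by norm_num,
        PySem.List.slice_natCast_add,
        show 3 * Nat.succ k = 3 * k + 1 + 1 + 1 from by omega]
    simp [List.drop_succ_cons]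

lemma pvPortA_chars : ∀ s : List Int, s.length % 3 = 0 →
    ((pvChoplist s 3).map pvGroupA).flatten = pvSpecA s := by
  intro s
  induction s using pvSpecA.induct with
  | case1 a b c t ih =>
    intro h
    have htl : t.length % 3 = 0 := by simp only [List.length_cons] at h; omega
    rw [pvChoplist_cons]
    simp only [List.map_cons, List.flatten_cons, ih htl]
    show pvGroupA [a, b, c] ++ _ = pvChA a b c ++ _
    rfl
  | case2 =>
    intro _
    rw [pvChoplist_nil]; rfl
  | case3 a =>
    intro h
    simp at h
  | case4 a b =>
    intro h
    simp only [List.length_cons, List.length_nil] at h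
    omega

-- B's big integer is the Nat byte value, cast (elements are nonneg under Pre_)
lemma pvTotal_eq : ∀ (s : List Int), (∀ x ∈ s, 0 ≤ x) →
    pvFromBytesLE s = ((pvTot s : Nat) : Int) := by
  intro s
  induction s with
  | nil => intro _; rfl
  | cons a t ih =>
    intro h
    have ha : 0 ≤ a := h a (by simp)
    show a + 256 * pvFromBytesLE t = ((a.toNat + 256 * pvTot t : Nat) : Int)
    rw [ih (fun x hx => h x (by simp [hx]))]
    push_cast [Int.toNat_of_nonneg ha]
    ring

-- for k ≤ 3 the k-th digit of V + 2^24·M is the k-th digit of V (V < 2^24)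
lemma pvDig_low (V M : Nat) :
    ∀ k < 4, pvDigN (V + 16777216 * M) k = pvDigN V k := by
  have hmod : ∀ x : Nat, x &&& 63 = x % 64 := fun x => by
    have := Nat.and_two_pow_sub_one_eq_mod x 6
    simpa using this
  intro k hk
  unfold pvDigN
  congr 1
  rw [hmod, hmod, Nat.shiftRight_eq_div_pow, Nat.shiftRight_eq_div_pow]
  interval_cases k <;> norm_num <;> omega

-- the (4+j)-th digit of V + 2^24·M is the j-th digit of M (V < 2^24)
lemma pvDig_high (V M : Nat) (hV : V < 16777216) (j : Nat) :
    pvDigN (V + 16777216 * M) (4 + j) = pvDigN M j := by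
  unfold pvDigN
  congr 1
  have hsr : (V + 16777216 * M) >>> (6 * (4 + j)) = M >>> (6 * j) := by
    rw [Nat.shiftRight_eq_div_pow, Nat.shiftRight_eq_div_pow,
        show 6 * (4 + j) = 24 + 6 * j from by ring, pow_add,
        ← Nat.div_div_eq_div_mul,
        show (V + 16777216 * M) / 2 ^ 24 = M from by
          rw [show (2 : Nat) ^ 24 = 16777216 from by norm_num]; omega]
  rw [hsr]

-- the global digit stream splits into per-chunk digit quadruples
lemma pvDigits_chunks : ∀ s : List Int, (∀ x ∈ s, 0 ≤ x ∧ x < 256) → s.length % 3 = 0 →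
    (List.range (s.length * 8 / 6)).map (pvDigN (pvTot s)) = pvSpecB s := by
  intro s
  induction s using pvSpecB.induct with
  | case1 a b c t ih =>
    intro h hl
    have ht : ∀ x ∈ t, 0 ≤ x ∧ x < 256 := fun x hx => h x (by simp [hx])
    have htl : t.length % 3 = 0 := by simp only [List.length_cons] at hl; omega
    have hlen : (a :: b :: c :: t).length * 8 / 6 = 4 + t.length * 8 / 6 := by
      simp only [List.length_cons]; omega
    rw [hlen, List.range_add, List.map_append, List.map_map]
    have hV : a.toNat + 256 * b.toNat + 65536 * c.toNat < 16777216 := by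
      obtain ⟨ha0, ha1⟩ := h a (by simp)
      obtain ⟨hb0, hb1⟩ := h b (by simp)
      obtain ⟨hc0, hc1⟩ := h c (by simp)
      omega
    have hN : pvTot (a :: b :: c :: t)
        = (a.toNat + 256 * b.toNat + 65536 * c.toNat) + 16777216 * pvTot t := by
      show a.toNat + 256 * (b.toNat + 256 * (c.toNat + 256 * pvTot t)) = _
      ring
    show (List.range 4).map (pvDigN (pvTot (a :: b :: c :: t)))
        ++ (List.range (t.length * 8 / 6)).map (pvDigN (pvTot (a :: b :: c :: t)) ∘ (4 + ·))
        = pvChB a b c ++ pvSpecB t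
    congr 1
    · rw [show List.range 4 = [0, 1, 2, 3] from by decide]
      simp only [List.map_cons, List.map_nil, hN]
      rw [pvDig_low _ _ 0 (by omega), pvDig_low _ _ 1 (by omega),
          pvDig_low _ _ 2 (by omega), pvDig_low _ _ 3 (by omega)]
      rfl
    · rw [← ih ht htl]
      apply List.map_congr_left
      intro j _
      simp only [Function.comp_apply, hN]
      exact pvDig_high _ _ hV j
  | case2 =>
    intro _ _
    rfl
  | case3 a =>
    intro _ hl
    simp at hl
  | case4 a b =>
    intro _ hl
    simp only [List.length_cons, List.length_nil] at hl
    omega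

-- B's port computes exactly the global digit stream of pvTot s
lemma pvPortB_chars (s : List Int) (h : ∀ x ∈ s, 0 ≤ x) :
    decode_6bit_ascii_alt s
      = String.ofList ((List.range (s.length * 8 / 6)).map (pvDigN (pvTot s))) := by
  simp only [decode_6bit_ascii_alt]
  rw [pvTotal_eq s h]
  congr 1
  rw [PySem.List.len_eq,
      show ((s.length : Int) * 8) = ((s.length * 8 : Nat) : Int) from by push_cast; ring,
      show (6 : Int) = ((6 : Nat) : Int) from rfl, PySem.Int.floordiv_natCast,
      PySem.List.pyRange_zero_natCast, List.map_map]
  apply List.map_congr_left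
  intro j _
  simp only [Function.comp_apply]
  rw [show ((((6 : Nat) : Int)) * ((j : Nat) : Int)).toNat = 6 * j from by omega,
      Int.shiftRight_natCast,
      show (63 : Int) = ((63 : Nat) : Int) from rfl, PySem.Int.band_natCast]
  unfold pvDigN
  congr 1

set_option maxRecDepth 100000 in
lemma pvChunk_eq (m n p : Nat) (hm : m < 256) (hn : n < 256) (hp : p < 256) :
    pvChA (m : Int) (n : Int) (p : Int) = pvChB (m : Int) (n : Int) (p : Int) := by
  have hmod : ∀ x : Nat, x &&& 63 = x % 64 := fun x => by
    have := Nat.and_two_pow_sub_one_eq_mod x 6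
    simpa using this
  have hand15 : ∀ x < 256, x &&& 15 = x % 16 := by decide
  have hand3 : ∀ x < 256, x &&& 3 = x % 4 := by decide
  have hor1 : ∀ u < 16, ∀ v < 4, (u <<< 2) ||| v = u * 4 + v := by decide
  have hor2 : ∀ u < 4, ∀ v < 16, (u <<< 4) ||| v = u * 16 + v := by decide
  -- A's four arguments as Nat casts
  have c0 : PySem.Int.band (m : Int) 63 = ((m &&& 63 : Nat) : Int) := by
    rw [show (63 : Int) = ((63 : Nat) : Int) from rfl, PySem.Int.band_natCast]
  have c1 : PySem.Int.bor ((PySem.Int.band (n : Int) 15) <<< 2) ((m : Int) >>> 6)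
      = (((n % 16) * 4 + m / 64 : Nat) : Int) := by
    rw [show (15 : Int) = ((15 : Nat) : Int) from rfl, PySem.Int.band_natCast, hand15 n hn,
        show (((n % 16 : Nat) : Int) <<< 2) = (((n % 16) <<< 2 : Nat) : Int) from rfl,
        show ((m : Int) >>> 6) = ((m >>> 6 : Nat) : Int) from rfl,
        PySem.Int.bor_natCast]
    congr 1
    rw [Nat.shiftRight_eq_div_pow]
    exact hor1 (n % 16) (Nat.mod_lt _ (by norm_num)) (m / 2 ^ 6) (by omega)
  have c2 : PySem.Int.bor ((PySem.Int.band (p : Int) 3) <<< 4) ((n : Int) >>> 4)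
      = (((p % 4) * 16 + n / 16 : Nat) : Int) := by
    rw [show (3 : Int) = ((3 : Nat) : Int) from rfl, PySem.Int.band_natCast, hand3 p hp,
        show (((p % 4 : Nat) : Int) <<< 4) = (((p % 4) <<< 4 : Nat) : Int) from rfl,
        show ((n : Int) >>> 4) = ((n >>> 4 : Nat) : Int) from rfl,
        PySem.Int.bor_natCast]
    congr 1
    rw [Nat.shiftRight_eq_div_pow]
    exact hor2 (p % 4) (Nat.mod_lt _ (by norm_num)) (n / 2 ^ 4) (by omega)
  have c3 : ((p : Int) >>> 2) = ((p / 4 : Nat) : Int) := by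
    rw [show ((p : Int) >>> 2) = ((p >>> 2 : Nat) : Int) from rfl, Nat.shiftRight_eq_div_pow]
  have hV : ((m : Int).toNat + 256 * (n : Int).toNat + 65536 * (p : Int).toNat)
      = m + 256 * n + 65536 * p := by omega
  unfold pvChA pvChB pvDigN pvConvert
  rw [c0, c1, c2, c3, hV]
  have toN : ∀ x : Nat, (((x : Int)) + 32).toNat = x + 32 := by intro x; omega
  simp only [toN, Nat.shiftRight_eq_div_pow, hmod]
  refine List.cons_eq_cons.mpr ⟨congrArg Char.ofNat ?_, List.cons_eq_cons.mpr ⟨congrArg Char.ofNat ?_,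
    List.cons_eq_cons.mpr ⟨congrArg Char.ofNat ?_, List.cons_eq_cons.mpr ⟨congrArg Char.ofNat ?_, rfl⟩⟩⟩⟩ <;>
    · norm_num
      omega

lemma pvSpec_eq : ∀ s : List Int, (∀ x ∈ s, 0 ≤ x ∧ x < 256) → pvSpecA s = pvSpecB s := by
  intro s
  induction s using pvSpecA.induct with
  | case1 a b c t ih =>
    intro h
    obtain ⟨ha0, ha1⟩ := h a (by simp)
    obtain ⟨hb0, hb1⟩ := h b (by simp)
    obtain ⟨hc0, hc1⟩ := h c (by simp)
    have ht : ∀ x ∈ t, 0 ≤ x ∧ x < 256 := fun x hx => h x (by simp [hx])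
    lift a to ℕ using ha0 with m
    lift b to ℕ using hb0 with n
    lift c to ℕ using hc0 with p
    have hm : m < 256 := by exact_mod_cast ha1
    have hn : n < 256 := by exact_mod_cast hb1
    have hp : p < 256 := by exact_mod_cast hc1
    show pvChA _ _ _ ++ pvSpecA t = pvChB _ _ _ ++ pvSpecB t
    rw [pvChunk_eq m n p hm hn hp, ih ht]
  | case2 => intro _; rfl
  | case3 a => intro _; rfl
  | case4 a b => intro _; rfl

-- ===== VERDICT (by name: the statement is the Claim_ definition above) =====
theorem decode_6bit_ascii_spec : Claim_equal_decode_6bit_ascii := by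
  intro s _ hpre
  show decode_6bit_ascii s = decode_6bit_ascii_alt s
  rw [show decode_6bit_ascii s = String.ofList (pvSpecA s) from
        congrArg String.ofList (pvPortA_chars s hpre.1),
      pvPortB_chars s (fun x hx => (hpre.2 x hx).1),
      pvDigits_chunks s hpre.2 hpre.1, pvSpec_eq s hpre.2]
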